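-- pv_equiv track=rewrite | github.com/uamrws/my_projects | temp.py | check_price
-- ===== SOURCE A (Python) =====
-- def check_price(prices):
--     n = ans = len(prices)
--     for i in range(n):
--         j = i + 1
--         while j < n:
--             if prices[j] == prices[j - 1] - 1:
--                 ans += 1
--             else:
--                 break
--             j += 1
--     return ans
-- ===== SOURCE B (Python) =====
-- def check_price(prices):
--     n = len(prices)
--     ans = n
--     run = 0
--     for j in range(1, n):
--         if prices[j] == prices[j - 1] - 1:
--             run += 1
--         else:
--             run = 0
--         ans += run
--     return ans
-- ===== Notes on version B (the rewrite author's own statement) =====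
-- stated objective: simpler
-- what changed: Replaced A's nested loops (a while-rescan restarted from every index) by a single left-to-right pass that maintains the current consecutive-decrement streak length and adds it at each position.
import Mathlib
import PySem

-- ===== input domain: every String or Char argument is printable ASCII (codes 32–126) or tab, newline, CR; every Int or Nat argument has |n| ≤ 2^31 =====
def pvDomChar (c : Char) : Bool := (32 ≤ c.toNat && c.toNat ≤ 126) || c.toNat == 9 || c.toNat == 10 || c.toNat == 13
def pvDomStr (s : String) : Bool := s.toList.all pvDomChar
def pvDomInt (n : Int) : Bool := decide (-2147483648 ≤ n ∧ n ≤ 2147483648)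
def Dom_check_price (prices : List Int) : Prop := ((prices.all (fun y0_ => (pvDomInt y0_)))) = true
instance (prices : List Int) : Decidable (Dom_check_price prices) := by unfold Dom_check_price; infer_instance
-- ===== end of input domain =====

-- B replaces A's nested rescans by a single pass that maintains the current streak length (simpler).

-- ===== PORT A =====
-- inner 'while j < n' loop of A, with fuel (n iterations always suffice)
def pvAwhile (prices : List Int) (n : Int) : Nat → Int → Int → Int
  | 0, _, ans => ans
  | fuel + 1, j, ans =>
      if j < n then
        if PySem.List.pyGetD prices j 0 = PySem.List.pyGetD prices (j - 1) 0 - 1 then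
          pvAwhile prices n fuel (j + 1) (ans + 1)
        else ans
      else ans

def check_price (prices : List Int) : Int :=
  let n : Int := prices.length
  (PySem.List.pyRange 0 n 1).foldl (fun ans i => pvAwhile prices n prices.length (i + 1) ans) n

-- ===== PORT B =====
def check_price_alt (prices : List Int) : Int :=
  let n : Int := prices.length
  ((PySem.List.pyRange 1 n 1).foldl
    (fun (s : Int × Int) j =>
      let run : Int :=
        if PySem.List.pyGetD prices j 0 = PySem.List.pyGetD prices (j - 1) 0 - 1 then s.1 + 1 else 0
      (run, s.2 + run)) (0, n)).2

-- ===== PRECONDITION & SPEC =====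
def Spec_check_price (prices : List Int) (out : Int) : Prop := out = check_price_alt prices
instance (prices : List Int) (out : Int) : Decidable (Spec_check_price prices out) := by unfold Spec_check_price; infer_instance

-- ===== CLAIM (what is proved, stated in full; the proofs are below) =====
def Claim_equal_check_price : Prop := ∀ (prices : List Int), Dom_check_price prices → Spec_check_price prices (check_price prices)

-- ===== LEMMAS AND PROOFS =====

-- Bool list of adjacent decrement matches: (matchList q)[k] ↔ q[k+1] = q[k] - 1
def matchList : List Int → List Bool
  | a :: b :: t => decide (b = a - 1) :: matchList (b :: t)
  | _ => []

-- leading trues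
def leadT : List Bool → Nat
  | true :: t => 1 + leadT t
  | _ => 0

-- Σ over all start positions of the run length from there
def gsum : List Bool → Int
  | [] => 0
  | b :: t => (leadT (b :: t) : Int) + gsum t

-- B's streak fold at the list level
def fB (ms : List Bool) (s : Int × Int) : Int × Int :=
  ms.foldl (fun s b => let r : Int := if b then s.1 + 1 else 0; (r, s.2 + r)) s

theorem matchList_length (q : List Int) : (matchList q).length = q.length - 1 := by
  induction q with
  | nil => simp [matchList]
  | cons a t ih =>
    cases t with
    | nil => simp [matchList]
    | cons b t' => simp [matchList] at ih ⊢; omega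

theorem matchList_getD (q : List Int) (k : Nat) (hk : k + 1 < q.length) :
    (matchList q).getD k false = decide (q.getD (k + 1) 0 = q.getD k 0 - 1) := by
  induction q generalizing k with
  | nil => simp at hk
  | cons a t ih =>
    cases t with
    | nil => simp at hk
    | cons b t' =>
      cases k with
      | zero => simp [matchList]
      | succ k' =>
        simp only [matchList, List.getD_cons_succ]
        exact ih k' (by simp at hk ⊢; omega)

theorem cond_iff (q : List Int) (k : Nat) (hk : k + 1 < q.length) :
    (PySem.List.pyGetD q ((k : Int) + 1) 0 = PySem.List.pyGetD q (((k : Int) + 1) - 1) 0 - 1)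
      ↔ (matchList q).getD k false = true := by
  have h1 : ((k : Int) + 1) = ((k + 1 : Nat) : Int) := by push_cast; ring
  have h2 : (((k : Int) + 1) - 1) = ((k : Nat) : Int) := by ring
  rw [h2, h1, PySem.List.pyGetD_natCast, PySem.List.pyGetD_natCast, matchList_getD q k hk]
  simp

theorem leadT_drop (ms : List Bool) (k : Nat) (hk : k < ms.length) :
    (leadT (ms.drop k) : Int) =
      (if ms.getD k false = true then 1 + (leadT (ms.drop (k + 1)) : Int) else 0) := by
  have hdrop : ms.drop k = ms[k] :: ms.drop (k + 1) := List.drop_eq_getElem_cons hk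
  have hget : ms.getD k false = ms[k] := List.getD_eq_getElem ms false hk
  rw [hdrop, hget]
  cases h : ms[k] <;> simp [leadT]

theorem pvAwhile_eq (q : List Int) (fuel : Nat) :
    ∀ (k : Nat) (ans : Int), (matchList q).length - k ≤ fuel →
      pvAwhile q q.length fuel ((k : Int) + 1) ans
        = ans + (leadT ((matchList q).drop k) : Int) := by
  induction fuel with
  | zero =>
    intro k ans h
    have : (matchList q).drop k = [] := List.drop_eq_nil_of_le (by omega)
    simp [pvAwhile, this, leadT]
  | succ fuel ih =>
    intro k ans h
    have hml := matchList_length q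
    simp only [pvAwhile]
    by_cases hlt : ((k : Int) + 1) < (q.length : Int)
    · have hk1 : k + 1 < q.length := by omega
      have hkm : k < (matchList q).length := by omega
      rw [if_pos hlt]
      by_cases hc : PySem.List.pyGetD q ((k : Int) + 1) 0 = PySem.List.pyGetD q (((k : Int) + 1) - 1) 0 - 1
      · rw [if_pos hc]
        have hcond : (matchList q).getD k false = true := (cond_iff q k hk1).mp hc
        have hrec : ((k : Int) + 1 + 1) = (((k + 1 : Nat) : Int) + 1) := by push_cast; ring
        rw [hrec, ih (k + 1) (ans + 1) (by omega)]
        rw [leadT_drop (matchList q) k hkm, if_pos hcond]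
        ring
      · rw [if_neg hc]
        have hcond : ¬ ((matchList q).getD k false = true) := fun hh => hc ((cond_iff q k hk1).mpr hh)
        rw [leadT_drop (matchList q) k hkm, if_neg hcond]
        ring
    · rw [if_neg hlt]
      have : (matchList q).drop k = [] := List.drop_eq_nil_of_le (by omega)
      simp [this, leadT]

-- A's outer sum equals n + gsum
theorem foldl_lead_sum (ms : List Bool) :
    ∀ (ans : Int), (List.range (ms.length + 1)).foldl
        (fun a k => a + (leadT (ms.drop k) : Int)) ans = ans + gsum ms := by
  induction ms with
  | nil => intro ans; simp [gsum, leadT]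
  | cons b t ih =>
    intro ans
    rw [List.range_succ_eq_map, List.foldl_cons, List.foldl_map]
    simp only [List.drop_zero, List.drop_succ_cons, List.length_cons]
    rw [ih (ans + (leadT (b :: t) : Int))]
    simp [gsum]; ring

-- B's fold: run-offset lemma
theorem fB_offset (ms : List Bool) :
    ∀ (r a : Int), (fB ms (r, a)).2 = a + r * (leadT ms : Int) + (fB ms (0, 0)).2 := by
  induction ms with
  | nil => intro r a; simp [fB, leadT]
  | cons b t ih =>
    intro r a
    cases b with
    | true =>
      have h1 : fB (true :: t) (r, a) = fB t (r + 1, a + (r + 1)) := by simp [fB]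
      have h2 : fB (true :: t) (0, 0) = fB t (1, 0 + 1) := by simp [fB]
      rw [h1, h2, ih (r + 1) (a + (r + 1)), ih 1 (0 + 1)]
      simp only [leadT]
      push_cast
      ring
    | false =>
      have h1 : fB (false :: t) (r, a) = fB t (0, a + 0) := by simp [fB]
      have h2 : fB (false :: t) (0, 0) = fB t (0, 0 + 0) := by simp [fB]
      rw [h1, h2, ih 0 (a + 0), ih 0 (0 + 0)]
      simp [leadT]

theorem fB_zero (ms : List Bool) : (fB ms (0, 0)).2 = gsum ms := by
  induction ms with
  | nil => simp [fB, gsum]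
  | cons b t ih =>
    cases b with
    | true =>
      have h2 : fB (true :: t) (0, 0) = fB t (1, 0 + 1) := by simp [fB]
      rw [h2, fB_offset, ih]
      simp only [gsum, leadT]
      push_cast
      ring
    | false =>
      have h2 : fB (false :: t) (0, 0) = fB t (0, 0 + 0) := by simp [fB]
      rw [h2, fB_offset, ih]
      simp [gsum, leadT]

theorem fB_run (ms : List Bool) (n : Int) : (fB ms (0, n)).2 = n + gsum ms := by
  rw [fB_offset ms 0 n, fB_zero]; ring

-- B's index fold over range = fB
theorem foldl_range_fB (ms : List Bool) :
    ∀ (s : Int × Int), (List.range ms.length).foldl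
        (fun s k => let r : Int := if ms.getD k false = true then s.1 + 1 else 0; (r, s.2 + r)) s
      = fB ms s := by
  induction ms with
  | nil => intro s; simp [fB]
  | cons b t ih =>
    intro s
    rw [List.length_cons, List.range_succ_eq_map, List.foldl_cons, List.foldl_map]
    simp only [List.getD_cons_zero, List.getD_cons_succ]
    rw [ih]
    simp [fB]

theorem check_price_eq (q : List Int) :
    check_price q = (q.length : Int) + gsum (matchList q) := by
  simp only [check_price]
  rw [PySem.List.pyRange_one]
  simp only [sub_zero, Int.toNat_natCast, List.foldl_map]
  have hml := matchList_length q
  cases q with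
  | nil => simp [matchList, gsum]
  | cons a t =>
    set q := a :: t
    have hcongr : ∀ (ans : Int), ∀ k ∈ List.range q.length,
        pvAwhile q (q.length : Int) q.length ((0 : Int) + (k : Int) + 1) ans
          = ans + (leadT ((matchList q).drop k) : Int) := by
      intro ans k _
      have h0 : ((0 : Int) + (k : Int) + 1) = ((k : Int) + 1) := by ring
      rw [h0, pvAwhile_eq q q.length k ans (by omega)]
    rw [PySem.List.foldl_congr_mem _ _ _ _ hcongr]
    have hlen : q.length = (matchList q).length + 1 := by
      simp only [hml]; simp [q]
    rw [hlen, foldl_lead_sum]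

theorem check_price_alt_eq (q : List Int) :
    check_price_alt q = (q.length : Int) + gsum (matchList q) := by
  simp only [check_price_alt]
  rw [PySem.List.pyRange_one]
  simp only [List.foldl_map]
  have hml := matchList_length q
  cases q with
  | nil => simp [matchList, gsum]
  | cons a t =>
    set q := a :: t
    have hlen : ((q.length : Int) - 1).toNat = (matchList q).length := by
      simp only [hml]; simp [q]
    rw [hlen]
    have hcongr : ∀ (s : Int × Int), ∀ k ∈ List.range (matchList q).length,
        (fun (s : Int × Int) (j : Int) =>
          let run : Int :=
            if PySem.List.pyGetD q j 0 = PySem.List.pyGetD q (j - 1) 0 - 1 then s.1 + 1 else 0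
          (run, s.2 + run)) s ((1 : Int) + (k : Int))
        = (fun (s : Int × Int) (k : Nat) =>
            let r : Int := if (matchList q).getD k false = true then s.1 + 1 else 0
            (r, s.2 + r)) s k := by
      intro s k hk
      simp only [List.mem_range] at hk
      have hk1 : k + 1 < q.length := by omega
      have h1 : ((1 : Int) + (k : Int)) = ((k : Int) + 1) := by ring
      dsimp only
      rw [h1]
      by_cases hc : PySem.List.pyGetD q ((k : Int) + 1) 0 = PySem.List.pyGetD q (((k : Int) + 1) - 1) 0 - 1
      · rw [if_pos hc, if_pos ((cond_iff q k hk1).mp hc)]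
      · rw [if_neg hc, if_neg (fun hh => hc ((cond_iff q k hk1).mpr hh))]
    rw [PySem.List.foldl_congr_mem _ _ _ _ hcongr, foldl_range_fB, fB_run]

-- ===== VERDICT (by name: the statement is the Claim_ definition above) =====
theorem check_price_spec : Claim_equal_check_price := by
  intro prices _
  unfold Spec_check_price
  rw [check_price_eq, check_price_alt_eq]
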